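-- pv_equiv track=rewrite | github.com/MuaiadHadad/Translator-with-Cultural-Context | backend/app.py | generate_smart_suggestions
-- ===== SOURCE A (Python) =====
-- def generate_smart_suggestions(user_message, bot_response):
--     """
--     Generate smart follow-up suggestions based on conversation context
--
--     Args:
--         user_message: The user's question
--         bot_response: The bot's response
--
--     Returns:
--         List of suggested follow-up questions
--     """
--     suggestions = []
--
--     # Keyword-based smart suggestions
--     user_lower = user_message.lower()
--
--     if any(word in user_lower for word in ['translate', 'mean', 'say']):
--         suggestions.extend([
--             "How do I pronounce this?",
--             "Are there regional variations?",
--             "What's the formal version?"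
--         ])
--     elif any(word in user_lower for word in ['slang', 'informal', 'casual']):
--         suggestions.extend([
--             "When should I use this?",
--             "What's the origin of this expression?",
--             "Are there similar expressions?"
--         ])
--     elif any(word in user_lower for word in ['culture', 'custom', 'etiquette']):
--         suggestions.extend([
--             "What else should I know?",
--             "Are there common mistakes to avoid?",
--             "How do locals actually use this?"
--         ])
--     elif any(word in user_lower for word in ['pronounce', 'pronunciation', 'sound']):
--         suggestions.extend([
--             "Can you break it down syllable by syllable?",
--             "Are there similar sounding words?",
--             "What are common pronunciation mistakes?"
--         ])
--     else:
--         # Generic helpful suggestions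
--         suggestions.extend([
--             "Tell me more about this",
--             "Give me an example sentence",
--             "What's the cultural context?"
--         ])
--
--     return suggestions[:3]  # Return top 3 suggestions
-- ===== SOURCE B (Python) =====
-- # B: instead of an ordered if/elif chain over keyword groups, flatten all
-- # keywords into one keyword->group-index map, take the MINIMUM matching group
-- # index in a single pass (min == first matching group of A), and index a table.
--
-- _KEYWORD_GROUP = {
--     'translate': 0, 'mean': 0, 'say': 0,
--     'slang': 1, 'informal': 1, 'casual': 1,
--     'culture': 2, 'custom': 2, 'etiquette': 2,
--     'pronounce': 3, 'pronunciation': 3, 'sound': 3,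
-- }
--
-- _TABLE = [
--     ["How do I pronounce this?",
--      "Are there regional variations?",
--      "What's the formal version?"],
--     ["When should I use this?",
--      "What's the origin of this expression?",
--      "Are there similar expressions?"],
--     ["What else should I know?",
--      "Are there common mistakes to avoid?",
--      "How do locals actually use this?"],
--     ["Can you break it down syllable by syllable?",
--      "Are there similar sounding words?",
--      "What are common pronunciation mistakes?"],
--     ["Tell me more about this",
--      "Give me an example sentence",
--      "What's the cultural context?"],
-- ]
--
--
-- def generate_smart_suggestions(user_message, bot_response):
--     user_lower = user_message.lower()
--     best = 4  # index of the generic default block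
--     for word, group in _KEYWORD_GROUP.items():
--         if word in user_lower and group < best:
--             best = group
--     return _TABLE[best][:3]
-- ===== Notes on version B (the rewrite author's own statement) =====
-- stated objective: alternative
-- what changed: Replaced the ordered if/elif first-match over keyword groups with a single flat pass over a keyword-to-group-index map maintaining a minimum-index accumulator, then one table lookup; min matching index equals the first matching group.
import Mathlib
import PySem

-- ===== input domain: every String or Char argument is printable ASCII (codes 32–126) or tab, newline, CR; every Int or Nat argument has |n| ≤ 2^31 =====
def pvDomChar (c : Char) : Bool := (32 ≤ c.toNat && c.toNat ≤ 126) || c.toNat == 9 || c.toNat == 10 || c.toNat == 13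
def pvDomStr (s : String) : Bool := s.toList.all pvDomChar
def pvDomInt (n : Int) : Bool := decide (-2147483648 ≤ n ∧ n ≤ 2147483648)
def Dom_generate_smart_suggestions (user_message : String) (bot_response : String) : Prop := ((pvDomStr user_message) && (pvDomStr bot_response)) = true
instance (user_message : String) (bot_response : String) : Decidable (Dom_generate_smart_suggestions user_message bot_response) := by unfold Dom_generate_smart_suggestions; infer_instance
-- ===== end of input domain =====

-- B replaces the ordered if/elif keyword chain by one flat pass over a keyword→group-index
-- map keeping the minimum matching index, then a table lookup (alternative decomposition).

-- ===== PORT A =====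
def generate_smart_suggestions (user_message : String) (bot_response : String) : List String :=
  let suggestions : List String := []
  let user_lower := PySem.Str.lower user_message
  let suggestions :=
    if ["translate", "mean", "say"].any (fun word => PySem.Str.isIn word user_lower) then
      suggestions ++ ["How do I pronounce this?",
                      "Are there regional variations?",
                      "What's the formal version?"]
    else if ["slang", "informal", "casual"].any (fun word => PySem.Str.isIn word user_lower) then
      suggestions ++ ["When should I use this?",
                      "What's the origin of this expression?",
                      "Are there similar expressions?"]
    else if ["culture", "custom", "etiquette"].any (fun word => PySem.Str.isIn word user_lower) then
      suggestions ++ ["What else should I know?",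
                      "Are there common mistakes to avoid?",
                      "How do locals actually use this?"]
    else if ["pronounce", "pronunciation", "sound"].any (fun word => PySem.Str.isIn word user_lower) then
      suggestions ++ ["Can you break it down syllable by syllable?",
                      "Are there similar sounding words?",
                      "What are common pronunciation mistakes?"]
    else
      suggestions ++ ["Tell me more about this",
                      "Give me an example sentence",
                      "What's the cultural context?"]
  PySem.List.slice suggestions none (some 3)

-- ===== PORT B =====
def pvKeywordGroup : List (String × Nat) :=
  [("translate", 0), ("mean", 0), ("say", 0),
   ("slang", 1), ("informal", 1), ("casual", 1),
   ("culture", 2), ("custom", 2), ("etiquette", 2),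
   ("pronounce", 3), ("pronunciation", 3), ("sound", 3)]

def pvTable : List (List String) :=
  [["How do I pronounce this?",
    "Are there regional variations?",
    "What's the formal version?"],
   ["When should I use this?",
    "What's the origin of this expression?",
    "Are there similar expressions?"],
   ["What else should I know?",
    "Are there common mistakes to avoid?",
    "How do locals actually use this?"],
   ["Can you break it down syllable by syllable?",
    "Are there similar sounding words?",
    "What are common pronunciation mistakes?"],
   ["Tell me more about this",
    "Give me an example sentence",
    "What's the cultural context?"]]

def generate_smart_suggestions_alt (user_message : String) (bot_response : String) : List String :=
  let user_lower := PySem.Str.lower user_message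
  let best := pvKeywordGroup.foldl
    (fun best wg => if PySem.Str.isIn wg.1 user_lower && decide (wg.2 < best) then wg.2 else best) 4
  PySem.List.slice (pvTable.getD best []) none (some 3)

-- ===== PRECONDITION & SPEC =====
def Spec_generate_smart_suggestions (user_message : String) (bot_response : String) (out : List String) : Prop := out = generate_smart_suggestions_alt user_message bot_response
instance (user_message : String) (bot_response : String) (out : List String) : Decidable (Spec_generate_smart_suggestions user_message bot_response out) := by unfold Spec_generate_smart_suggestions; infer_instance

-- ===== CLAIM =====
def Claim_equal_generate_smart_suggestions : Prop := ∀ (user_message : String) (bot_response : String), Dom_generate_smart_suggestions user_message bot_response → Spec_generate_smart_suggestions user_message bot_response (generate_smart_suggestions user_message bot_response)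

-- ===== LEMMAS AND PROOFS =====

-- the minimum-index fold over the 12 flat keywords equals the first-match chain over the 4 groups
theorem pvFold12 (b1 b2 b3 b4 b5 b6 b7 b8 b9 b10 b11 b12 : Bool) :
    List.foldl (fun best (wg : Bool × Nat) => if wg.1 && decide (wg.2 < best) then wg.2 else best) 4
      [(b1,0),(b2,0),(b3,0),(b4,1),(b5,1),(b6,1),(b7,2),(b8,2),(b9,2),(b10,3),(b11,3),(b12,3)]
    = if b1 || b2 || b3 then 0 else if b4 || b5 || b6 then 1
      else if b7 || b8 || b9 then 2 else if b10 || b11 || b12 then 3 else 4 := by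
  revert b1 b2 b3 b4 b5 b6 b7 b8 b9 b10 b11 b12
  decide

-- ===== VERDICT =====
set_option maxHeartbeats 1000000 in
theorem generate_smart_suggestions_spec : Claim_equal_generate_smart_suggestions := by
  intro u b _
  unfold Spec_generate_smart_suggestions generate_smart_suggestions generate_smart_suggestions_alt
  simp only [pvKeywordGroup, List.any, Bool.or_false]
  rw [show
      ([("translate", 0), ("mean", 0), ("say", 0), ("slang", 1), ("informal", 1), ("casual", 1),
        ("culture", 2), ("custom", 2), ("etiquette", 2), ("pronounce", 3), ("pronunciation", 3),
        ("sound", 3)] : List (String × Nat)).foldl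
        (fun best wg => if PySem.Str.isIn wg.1 (PySem.Str.lower u) && decide (wg.2 < best) then wg.2 else best) 4
      = List.foldl (fun best (wg : Bool × Nat) => if wg.1 && decide (wg.2 < best) then wg.2 else best) 4
        [(PySem.Str.isIn "translate" (PySem.Str.lower u),0),(PySem.Str.isIn "mean" (PySem.Str.lower u),0),
         (PySem.Str.isIn "say" (PySem.Str.lower u),0),(PySem.Str.isIn "slang" (PySem.Str.lower u),1),
         (PySem.Str.isIn "informal" (PySem.Str.lower u),1),(PySem.Str.isIn "casual" (PySem.Str.lower u),1),
         (PySem.Str.isIn "culture" (PySem.Str.lower u),2),(PySem.Str.isIn "custom" (PySem.Str.lower u),2),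
         (PySem.Str.isIn "etiquette" (PySem.Str.lower u),2),(PySem.Str.isIn "pronounce" (PySem.Str.lower u),3),
         (PySem.Str.isIn "pronunciation" (PySem.Str.lower u),3),(PySem.Str.isIn "sound" (PySem.Str.lower u),3)]
      from rfl,
    pvFold12]
  cases h1 : (PySem.Str.isIn "translate" (PySem.Str.lower u) || PySem.Str.isIn "mean" (PySem.Str.lower u) || PySem.Str.isIn "say" (PySem.Str.lower u)) <;>
  cases h2 : (PySem.Str.isIn "slang" (PySem.Str.lower u) || PySem.Str.isIn "informal" (PySem.Str.lower u) || PySem.Str.isIn "casual" (PySem.Str.lower u)) <;>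
  cases h3 : (PySem.Str.isIn "culture" (PySem.Str.lower u) || PySem.Str.isIn "custom" (PySem.Str.lower u) || PySem.Str.isIn "etiquette" (PySem.Str.lower u)) <;>
  cases h4 : (PySem.Str.isIn "pronounce" (PySem.Str.lower u) || PySem.Str.isIn "pronunciation" (PySem.Str.lower u) || PySem.Str.isIn "sound" (PySem.Str.lower u)) <;>
  simp_all [pvTable] <;> split_ifs <;> simp_all
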